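-- pv_equiv track=rewrite | github.com/suzu-ki/papaer_read | app.py | trim_before_abstract
-- ===== SOURCE A (Python) =====
-- START_KEYWORDS = ["Abstract", "ABSTRACT", "アブスト", "あらまし", "概要"]
--
-- def trim_before_abstract(text):
--     """Abstract系キーワード以降のテキストを返す"""
--     lower_text = text.lower()
--     min_idx = len(text)
--     for kw in START_KEYWORDS:
--         idx = lower_text.find(kw.lower())
--         if idx != -1 and idx < min_idx:
--             min_idx = idx
--     if min_idx < len(text):
--         return text[min_idx:]
--     return text  # キーワードがなければ全文返す
-- ===== SOURCE B (Python) =====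
-- START_KEYWORDS = ["Abstract", "ABSTRACT", "アブスト", "あらまし", "概要"]
--
-- def trim_before_abstract(text):
--     """Abstract系キーワード以降のテキストを返す"""
--     lower_text = text.lower()
--     kws = [kw.lower() for kw in START_KEYWORDS]
--     # single left-to-right scan: stop at the first position where any keyword starts
--     for i in range(len(lower_text)):
--         if any(lower_text.startswith(kw, i) for kw in kws):
--             return text[i:]
--     return text
-- ===== Notes on version B (the rewrite author's own statement) =====
-- stated objective: alternative
-- what changed: Instead of running a separate full-text find() for each of the five keywords and taking the minimum index, B makes a single left-to-right scan over the lowered text and returns at the first position where any lowered keyword starts.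
import Mathlib
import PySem

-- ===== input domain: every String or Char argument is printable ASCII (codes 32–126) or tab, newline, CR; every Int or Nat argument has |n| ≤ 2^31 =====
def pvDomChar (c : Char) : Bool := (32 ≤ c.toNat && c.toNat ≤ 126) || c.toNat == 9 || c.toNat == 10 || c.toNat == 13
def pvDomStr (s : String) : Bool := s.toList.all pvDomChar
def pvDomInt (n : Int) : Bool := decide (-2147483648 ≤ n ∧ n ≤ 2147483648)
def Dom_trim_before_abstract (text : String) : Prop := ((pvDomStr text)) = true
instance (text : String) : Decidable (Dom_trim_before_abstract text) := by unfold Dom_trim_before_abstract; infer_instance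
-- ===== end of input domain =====

-- B replaces A's five separate find()+min passes by one left-to-right scan that stops at the
-- first position where any lowered keyword starts (objective: alternative algorithm, same result).

def pvSTART_KEYWORDS : List String := ["Abstract", "ABSTRACT", "アブスト", "あらまし", "概要"]

-- ===== PORT A =====
def trim_before_abstract (text : String) : String :=
  let lower_text := PySem.Str.lower text
  let min_idx := pvSTART_KEYWORDS.foldl (fun m kw =>
      let idx := PySem.Str.find lower_text (PySem.Str.lower kw)
      if idx ≠ -1 ∧ idx < m then idx else m) (PySem.Str.len text)
  if min_idx < PySem.Str.len text then PySem.Str.slice text (some min_idx) none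
  else text

-- ===== PORT B =====
-- `for i in range(n): if p(i): return text[i:]` — scan i = start, start+1, …: first hit wins
def pvFirstHit (p : Nat → Bool) : Nat → Nat → Option Nat
  | _, 0 => none
  | i, k + 1 => if p i then some i else pvFirstHit p (i + 1) k

def trim_before_abstract_alt (text : String) : String :=
  let lower_text := PySem.Str.lower text
  let kws := pvSTART_KEYWORDS.map (fun kw => (PySem.Str.lower kw).toList)
  -- lower_text.startswith(kw, i) for 0 ≤ i ≤ len is exactly: kw is a prefix of lower_text[i:]
  let p : Nat → Bool := fun i => kws.any (fun kw => PySem.Chars.startswith (lower_text.toList.drop i) kw)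
  match pvFirstHit p 0 lower_text.toList.length with
  | some i => PySem.Str.slice text (some (i : Int)) none
  | none => text

-- ===== PRECONDITION & SPEC =====
def Spec_trim_before_abstract (text : String) (out : String) : Prop := out = trim_before_abstract_alt text
instance (text : String) (out : String) : Decidable (Spec_trim_before_abstract text out) := by unfold Spec_trim_before_abstract; infer_instance

-- ===== CLAIM (what is proved, stated in full; the proofs are below) =====
def Claim_equal_trim_before_abstract : Prop := ∀ (text : String), Dom_trim_before_abstract text → Spec_trim_before_abstract text (trim_before_abstract text)

-- ===== LEMMAS AND PROOFS =====

-- characterisation of A's fold: the result is ≤ the init, is the init or one of the (≠ -1) finds,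
-- and is a lower bound of every successful find
theorem pvFoldMin_spec (s : List Char) (P : List (List Char)) (m0 : Int) :
    (P.foldl (fun m kw =>
        if PySem.Chars.find s kw ≠ -1 ∧ PySem.Chars.find s kw < m then PySem.Chars.find s kw else m) m0) ≤ m0 ∧
    ((P.foldl (fun m kw =>
        if PySem.Chars.find s kw ≠ -1 ∧ PySem.Chars.find s kw < m then PySem.Chars.find s kw else m) m0) = m0 ∨
      ∃ kw ∈ P, PySem.Chars.find s kw ≠ -1 ∧ PySem.Chars.find s kw =
        (P.foldl (fun m kw =>
          if PySem.Chars.find s kw ≠ -1 ∧ PySem.Chars.find s kw < m then PySem.Chars.find s kw else m) m0)) ∧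
    (∀ kw ∈ P, PySem.Chars.find s kw ≠ -1 →
      (P.foldl (fun m kw =>
        if PySem.Chars.find s kw ≠ -1 ∧ PySem.Chars.find s kw < m then PySem.Chars.find s kw else m) m0) ≤
        PySem.Chars.find s kw) := by
  induction P generalizing m0 with
  | nil => simp
  | cons q P ih =>
    simp only [List.foldl_cons]
    by_cases h : PySem.Chars.find s q ≠ -1 ∧ PySem.Chars.find s q < m0
    · rw [if_pos h]
      obtain ⟨h1, h2, h3⟩ := ih (PySem.Chars.find s q)
      refine ⟨by omega, ?_, ?_⟩
      · rcases h2 with h2 | ⟨kw, hkw, hne, heq⟩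
        · exact Or.inr ⟨q, by simp, h.1, h2.symm⟩
        · exact Or.inr ⟨kw, by simp [hkw], hne, heq⟩
      · intro kw hkw hne
        rcases List.mem_cons.mp hkw with rfl | hkw
        · exact h1
        · exact h3 kw hkw hne
    · rw [if_neg h]
      obtain ⟨h1, h2, h3⟩ := ih m0
      refine ⟨h1, ?_, ?_⟩
      · rcases h2 with h2 | ⟨kw, hkw, hne, heq⟩
        · exact Or.inl h2
        · exact Or.inr ⟨kw, by simp [hkw], hne, heq⟩
      · intro kw hkw hne
        rcases List.mem_cons.mp hkw with rfl | hkw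
        · push Not at h; exact le_trans h1 (h hne)
        · exact h3 kw hkw hne

theorem pvFirstHit_none (p : Nat → Bool) (i k : Nat)
    (h : ∀ l, i ≤ l → l < i + k → p l = false) : pvFirstHit p i k = none := by
  induction k generalizing i with
  | zero => rfl
  | succ k ih =>
    unfold pvFirstHit
    rw [h i le_rfl (by omega)]
    simp only [Bool.false_eq_true, if_false]
    exact ih (i + 1) (fun l h1 h2 => h l (by omega) (by omega))

theorem pvFirstHit_some (p : Nat → Bool) (i k j : Nat)
    (hij : i ≤ j) (hjk : j < i + k) (hp : p j = true)
    (hmin : ∀ l, i ≤ l → l < j → p l = false) : pvFirstHit p i k = some j := by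
  induction k generalizing i with
  | zero => omega
  | succ k ih =>
    unfold pvFirstHit
    by_cases hji : j = i
    · subst hji; rw [hp]; simp
    · rw [hmin i le_rfl (by omega)]
      simp only [Bool.false_eq_true, if_false]
      exact ih (i + 1) (by omega) (by omega) (fun l h1 h2 => hmin l (by omega) h2)

-- a keyword starting at position l occurs in s, so find succeeds and points no later than l
theorem pvFind_le_of_prefix_drop (s kw : List Char) (l : Nat) (h : kw <+: s.drop l) :
    PySem.Chars.find s kw ≠ -1 ∧ PySem.Chars.find s kw ≤ (l : Int) := by
  have hinf : kw <:+: s := h.isInfix.trans (List.drop_suffix l s).isInfix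
  have hne : PySem.Chars.find s kw ≠ -1 := (PySem.Chars.find_ne_neg_one_iff s kw).mpr hinf
  have hge : 0 ≤ PySem.Chars.find s kw := by
    have := PySem.Chars.neg_one_le_find s kw; omega
  obtain ⟨_, hfmin⟩ := PySem.Chars.find_spec hge
  refine ⟨hne, ?_⟩
  by_contra hlt
  push Not at hlt
  exact hfmin l (by omega) h

-- ===== VERDICT (by name: the statement is the Claim_ definition above) =====
theorem trim_before_abstract_spec : Claim_equal_trim_before_abstract := by
  intro text _
  unfold Spec_trim_before_abstract trim_before_abstract trim_before_abstract_alt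
  simp only [PySem.Str.find_eq, PySem.Str.len_eq, PySem.Str.toList_lower]
  set s : List Char := PySem.Chars.lower text.toList with hs
  have hlen : s.length = text.toList.length := by rw [hs]; simp [PySem.Chars.lower]
  set P : List (List Char) := pvSTART_KEYWORDS.map (fun kw => PySem.Chars.lower kw.toList) with hP
  set p : Nat → Bool := fun i => P.any (fun kw => PySem.Chars.startswith (s.drop i) kw) with hp
  have hpc : ∀ i, p i = true ↔ ∃ kw ∈ P, kw <+: s.drop i := by
    intro i
    simp [hp, List.any_eq_true, PySem.Chars.startswith_iff]
  -- A's fold over the keywords is the fold over the lowered keyword lists P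
  have hfold : pvSTART_KEYWORDS.foldl (fun m kw =>
      if PySem.Chars.find s (PySem.Chars.lower kw.toList) ≠ -1 ∧ PySem.Chars.find s (PySem.Chars.lower kw.toList) < m
      then PySem.Chars.find s (PySem.Chars.lower kw.toList) else m) ((text.toList.length : Int)) =
      P.foldl (fun m kw =>
      if PySem.Chars.find s kw ≠ -1 ∧ PySem.Chars.find s kw < m then PySem.Chars.find s kw else m)
      ((text.toList.length : Int)) := by
    rw [hP, List.foldl_map]
  rw [hfold]
  set m : Int := P.foldl (fun m kw =>
      if PySem.Chars.find s kw ≠ -1 ∧ PySem.Chars.find s kw < m then PySem.Chars.find s kw else m)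
      ((text.toList.length : Int)) with hm
  obtain ⟨hle, hcases, hlb⟩ := pvFoldMin_spec s P ((text.toList.length : Int))
  rw [← hm] at hle hcases hlb
  by_cases hlt : m < (text.toList.length : Int)
  · -- some keyword occurs; A slices at m, B's scan stops exactly at m.toNat
    rw [if_pos hlt]
    rcases hcases with heq | ⟨kw, hkw, hne, heq⟩
    · omega
    · have hge : 0 ≤ m := by
        have := PySem.Chars.neg_one_le_find s kw; omega
      have hfind : 0 ≤ PySem.Chars.find s kw := by omega
      obtain ⟨hpref, _⟩ := PySem.Chars.find_spec hfind
      have hpm : p m.toNat = true := by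
        rw [hpc]; exact ⟨kw, hkw, by rwa [heq] at hpref⟩
      have hmin : ∀ l, 0 ≤ l → l < m.toNat → p l = false := by
        intro l _ hl
        by_contra hc
        rw [Bool.not_eq_false, hpc] at hc
        obtain ⟨kw', hkw', hpre'⟩ := hc
        obtain ⟨hne', hle'⟩ := pvFind_le_of_prefix_drop s kw' l hpre'
        have := hlb kw' hkw' hne'
        omega
      rw [pvFirstHit_some p 0 s.length m.toNat (by omega) (by omega) hpm hmin]
      have hmm : ((m.toNat : Int)) = m := by omega
      simp [hmm]
  · -- no keyword occurs anywhere; both return the whole text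
    rw [if_neg hlt]
    have hmn : m = (text.toList.length : Int) := le_antisymm hle (by omega)
    have hnone : pvFirstHit p 0 s.length = none := by
      apply pvFirstHit_none
      intro l _ hl
      by_contra hc
      rw [Bool.not_eq_false, hpc] at hc
      obtain ⟨kw', hkw', hpre'⟩ := hc
      obtain ⟨hne', hle'⟩ := pvFind_le_of_prefix_drop s kw' l hpre'
      have := hlb kw' hkw' hne'
      omega
    rw [hnone]
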